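-- pv_equiv track=rewrite | github.com/nalli379/py_problemsolving | budget_app.py | draw_y_axis
-- ===== SOURCE A (Python) =====
-- def draw_y_axis(percent_dict, categories, chart, name_length):
--     #draw y axis category names letter by letter leaving space
--     y = 0
--     while y <= name_length:
--         y_row = "     "
--         for key, value in percent_dict.items():
--             category_name = key
--             try:
--                 y_row += category_name[y] + "  "
--             except:
--                 y_row += "   "
--
--         #at end of y axis create new row to print second row of letters across
--         if y <= name_length -1:
--             chart += y_row + "\n"
--         else:
--             chart += y_row.strip("")
--
--         y += 1
--
--     return chart
-- ===== SOURCE B (Python) =====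
-- def draw_y_axis(percent_dict, categories, chart, name_length):
--     rows = ["     "] * max(name_length + 1, 0)
--     for key in percent_dict:
--         for y in range(len(rows)):
--             rows[y] += (key[y] + "  ") if y < len(key) else "   "
--     return chart + "\n".join(rows)
-- ===== Notes on version B (the rewrite author's own statement) =====
-- stated objective: simpler
-- what changed: Replaces the row-major while-loop with try/except indexing and conditional newline emission by a category-major pass over a pre-sized list of row buffers (guarded index, no exception handling), joined once with '\n' at the end.
import Mathlib
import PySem

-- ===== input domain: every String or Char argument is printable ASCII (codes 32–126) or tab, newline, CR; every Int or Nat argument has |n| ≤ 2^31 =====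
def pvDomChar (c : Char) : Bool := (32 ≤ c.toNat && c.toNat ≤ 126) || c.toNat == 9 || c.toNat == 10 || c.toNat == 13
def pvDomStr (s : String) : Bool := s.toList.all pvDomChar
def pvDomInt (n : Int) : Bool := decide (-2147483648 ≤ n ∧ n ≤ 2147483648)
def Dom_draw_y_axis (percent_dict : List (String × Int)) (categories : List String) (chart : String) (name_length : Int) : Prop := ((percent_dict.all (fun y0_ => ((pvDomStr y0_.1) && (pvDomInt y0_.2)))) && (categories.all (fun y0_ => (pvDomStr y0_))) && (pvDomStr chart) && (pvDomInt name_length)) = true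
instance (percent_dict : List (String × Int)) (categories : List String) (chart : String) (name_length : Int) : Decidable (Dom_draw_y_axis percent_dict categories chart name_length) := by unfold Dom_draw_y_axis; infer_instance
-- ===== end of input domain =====

-- B builds the rows category-major into a pre-sized list of row buffers and joins once with '\n'; same output, simpler decomposition (no exception handling, no conditional newline emission).

-- ===== PORT A =====
-- try: y_row += category_name[y] + "  "  except: y_row += "   "   (the except catches the IndexError that pyGet? signals by none)
def pvCellA (key : String) (y : Int) : String :=
  match PySem.Str.pyGet? key y with
  | some c => String.ofList [c] ++ "  "
  | none => "   "

-- the inner for-loop over percent_dict.items() building y_row from "     "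
def pvRowA (items : List (String × Int)) (y : Int) : String :=
  items.foldl (fun r kv => r ++ pvCellA kv.1 y) "     "

-- the while-loop: y from 0 while y <= name_length; strip("") strips nothing, so the last row is appended as-is
def pvLoopA (items : List (String × Int)) (nl : Int) (y : Int) (chart : String) : String :=
  if _h : y ≤ nl then
    let y_row := pvRowA items y
    let chart' := if y ≤ nl - 1 then chart ++ y_row ++ "\n" else chart ++ y_row
    pvLoopA items nl (y + 1) chart'
  else chart
termination_by (nl + 1 - y).toNat
decreasing_by omega

def draw_y_axis (percent_dict : List (String × Int)) (categories : List String) (chart : String) (name_length : Int) : String :=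
  pvLoopA (PySem.Dict.ofList percent_dict).items name_length 0 chart

-- ===== PORT B =====
-- (key[y] + "  ") if y < len(key) else "   "  — the index is guarded, so the getD default is never used
def pvCellB (key : String) (y : Nat) : String :=
  if (y : Int) < PySem.Str.len key then String.ofList [(PySem.Str.pyGet? key (y : Int)).getD ' '] ++ "  " else "   "

def draw_y_axis_alt (percent_dict : List (String × Int)) (categories : List String) (chart : String) (name_length : Int) : String :=
  let rows0 := List.replicate (max (name_length + 1) 0).toNat "     "
  let rows := (PySem.Dict.ofList percent_dict).keys.foldl
    (fun rows key => rows.mapIdx (fun y r => r ++ pvCellB key y)) rows0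
  chart ++ PySem.Str.join "\n" rows

-- ===== PRECONDITION & SPEC =====
def Spec_draw_y_axis (percent_dict : List (String × Int)) (categories : List String) (chart : String) (name_length : Int) (out : String) : Prop := out = draw_y_axis_alt percent_dict categories chart name_length
instance (percent_dict : List (String × Int)) (categories : List String) (chart : String) (name_length : Int) (out : String) : Decidable (Spec_draw_y_axis percent_dict categories chart name_length out) := by unfold Spec_draw_y_axis; infer_instance

-- ===== CLAIM (what is proved, stated in full; the proofs are below) =====
def Claim_equal_draw_y_axis : Prop := ∀ (percent_dict : List (String × Int)) (categories : List String) (chart : String) (name_length : Int), Dom_draw_y_axis percent_dict categories chart name_length → Spec_draw_y_axis percent_dict categories chart name_length (draw_y_axis percent_dict categories chart name_length)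

-- ===== LEMMAS AND PROOFS =====

-- the suffix a key list appends to the row buffer at row index y
def pvSuffix (keys : List String) (y : Int) : String :=
  match keys with
  | [] => ""
  | k :: ks => pvCellA k y ++ pvSuffix ks y

-- glue with '\n' between rows, nothing after the last
def pvGlue : List String → String
  | [] => ""
  | [r] => r
  | r :: s :: rest => r ++ "\n" ++ pvGlue (s :: rest)

theorem pvCellA_eq_cellB (key : String) (y : Nat) : pvCellA key (y : Int) = pvCellB key y := by
  unfold pvCellA pvCellB
  simp only [PySem.Str.pyGet?_natCast, PySem.Str.len_eq]
  by_cases h : y < key.toList.length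
  · rw [List.getElem?_eq_getElem h, if_pos (by exact_mod_cast h)]
    simp
  · rw [List.getElem?_eq_none (by omega), if_neg (by exact_mod_cast h)]

theorem pvGlue_cons (r : String) (t : List String) (h : t ≠ []) :
    pvGlue (r :: t) = r ++ "\n" ++ pvGlue t := by
  cases t with
  | nil => exact absurd rfl h
  | cons s rest => rfl

theorem string_toList_inj {a b : String} (h : a.toList = b.toList) : a = b := by
  have := congrArg String.ofList h
  simpa using this

theorem pvGlue_eq_join (rows : List String) : PySem.Str.join "\n" rows = pvGlue rows := by
  induction rows with
  | nil => apply string_toList_inj; simp [PySem.Str.toList_join, PySem.Chars.join, pvGlue, List.intercalate]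
  | cons r t ih =>
    cases t with
    | nil =>
      apply string_toList_inj
      simp [PySem.Str.toList_join, PySem.Chars.join, pvGlue, List.intercalate]
    | cons s rest =>
      rw [pvGlue_cons r (s :: rest) (by simp)]
      apply string_toList_inj
      rw [PySem.Str.toList_join]
      simp only [List.map_cons]
      rw [PySem.Chars.join_cons_cons]
      simp [← ih, PySem.Str.toList_join]

theorem pvFoldl_suffix (y : Int) (l : List String) (init : String) :
    l.foldl (fun r k => r ++ pvCellA k y) init = init ++ pvSuffix l y := by
  induction l generalizing init with
  | nil => simp [pvSuffix]
  | cons k ks ih =>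
    simp only [List.foldl_cons, pvSuffix]
    rw [ih (init ++ pvCellA k y), String.append_assoc]

theorem pvRowA_eq (items : List (String × Int)) (y : Int) :
    pvRowA items y = "     " ++ pvSuffix (items.map Prod.fst) y := by
  unfold pvRowA
  rw [← pvFoldl_suffix y (items.map Prod.fst) "     ", List.foldl_map]

theorem loopA_eq (items : List (String × Int)) (nl : Int) :
    ∀ (n : Nat) (y : Int) (chart : String), (nl + 1 - y).toNat = n →
      pvLoopA items nl y chart =
        chart ++ pvGlue ((List.range n).map (fun i : Nat => pvRowA items (y + (i : Int)))) := by
  intro n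
  induction n with
  | zero =>
    intro y chart hn
    rw [pvLoopA, dif_neg (by omega)]
    simp [pvGlue]
  | succ m ih =>
    intro y chart hn
    rw [pvLoopA, dif_pos (by omega : y ≤ nl)]
    simp only []
    rw [List.range_succ_eq_map, List.map_cons, List.map_map]
    cases m with
    | zero =>
      have hy : ¬ y ≤ nl - 1 := by omega
      rw [if_neg hy, ih (y + 1) (chart ++ pvRowA items y) (by omega)]
      simp [pvGlue]
    | succ m' =>
      have hy : y ≤ nl - 1 := by omega
      rw [if_pos hy, ih (y + 1) (chart ++ pvRowA items y ++ "\n") (by omega)]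
      rw [pvGlue_cons _ _ (by simp)]
      have hfun : ((fun i : Nat => pvRowA items (y + i)) ∘ Nat.succ) =
          (fun i : Nat => pvRowA items (y + 1 + (i : Int))) := by
        funext i
        simp only [Function.comp]
        congr 1
        push_cast
        ring
      rw [hfun]
      simp [String.append_assoc]

theorem foldB_eq (keys : List String) :
    ∀ rows : List String,
      keys.foldl (fun rows key => rows.mapIdx (fun y r => r ++ pvCellB key y)) rows
        = rows.mapIdx (fun y r => r ++ pvSuffix keys (y : Int)) := by
  induction keys with
  | nil =>
    intro rows
    simp only [List.foldl_nil, pvSuffix]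
    apply List.ext_getElem <;> simp
  | cons k ks ih =>
    intro rows
    simp only [List.foldl_cons]
    rw [ih, List.mapIdx_mapIdx]
    apply List.ext_getElem <;> simp [pvSuffix, ← pvCellA_eq_cellB, String.append_assoc]

-- ===== VERDICT (by name: the statement is the Claim_ definition above) =====
theorem draw_y_axis_spec : Claim_equal_draw_y_axis := by
  intro pd cats chart nl _
  unfold Spec_draw_y_axis draw_y_axis
  have halt : draw_y_axis_alt pd cats chart nl =
      chart ++ PySem.Str.join "\n" ((PySem.Dict.ofList pd).keys.foldl
        (fun rows key => rows.mapIdx (fun y r => r ++ pvCellB key y))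
        (List.replicate (max (nl + 1) 0).toNat "     ")) := rfl
  rw [halt, loopA_eq (PySem.Dict.ofList pd).items nl (nl + 1).toNat 0 chart (by omega)]
  rw [foldB_eq, pvGlue_eq_join]
  congr 1
  have hmax : (max (nl + 1) 0).toNat = (nl + 1).toNat := by omega
  rw [hmax]
  refine congrArg pvGlue ?_
  apply List.ext_getElem
  · simp
  · intro i h1 h2
    simp only [List.getElem_map, List.getElem_range, List.getElem_mapIdx, List.getElem_replicate]
    rw [pvRowA_eq]
    simp [PySem.Dict.keys]
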